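-- pv_equiv track=rewrite | github.com/adarshmodh/Data-Structures-Algorithms-in-Python | graphs/track_friend_groups.py | track_friend_groups
-- ===== SOURCE A (Python) =====
-- class UnionFind:
--     def __init__(self, n):
--         self.parent = list(range(n + 1))  # 1-based IDs
--         self.size = [1] * (n + 1)
--
--     def find(self, x):
--         if self.parent[x] != x:
--             self.parent[x] = self.find(self.parent[x])  # path compression
--         return self.parent[x]
--
--     def union(self, a, b):
--         rootA, rootB = self.find(a), self.find(b)
--         if rootA == rootB:
--             return
--         # union by size
--         if self.size[rootA] < self.size[rootB]:
--             rootA, rootB = rootB, rootA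
--         self.parent[rootB] = rootA
--         self.size[rootA] += self.size[rootB]
--
--     def get_size(self, x):
--         return self.size[self.find(x)]
--
-- def track_friend_groups(n, queryType, students1, students2):
--     uf = UnionFind(n)
--     results = []
--
--     for q, a, b in zip(queryType, students1, students2):
--         if q == "Friend":
--             uf.union(a, b)
--         elif q == "Total":
--             total_size = uf.get_size(a) + uf.get_size(b)
--             results.append(total_size)
--
--     return results
-- ===== SOURCE B (Python) =====
-- def track_friend_groups(n, queryType, students1, students2):
--     # quick-find with explicit member lists: merge the smaller group into the
--     # larger and relabel its members; no parent forest, no recursive find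
--     group_of = {x: x for x in range(n + 1)}
--     members = {x: [x] for x in range(n + 1)}
--     results = []
--     for q, a, b in zip(queryType, students1, students2):
--         if q == "Friend":
--             ga, gb = group_of[a], group_of[b]
--             if ga != gb:
--                 la, lb = members[ga], members[gb]
--                 if len(la) < len(lb):
--                     ga, la, gb, lb = gb, lb, ga, la
--                 for x in lb:
--                     group_of[x] = ga
--                 members[ga] = la + lb
--                 del members[gb]
--         elif q == "Total":
--             results.append(len(members[group_of[a]]) + len(members[group_of[b]]))
--     return results
-- ===== Notes on version B (the rewrite author's own statement) =====
-- stated objective: alternative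
-- what changed: Replaces the path-compressed union-by-size forest (recursive find, parent/size arrays) with a quick-find structure: a dict node->group id plus explicit member lists per group, merging by relabeling the smaller group's members.
-- outside the precondition, e.g. on track_friend_groups(1, ['Total'], [-1], [-1]): A returns [2], B raises KeyError; on track_friend_groups(1, ['Friend'], [2], [0]): A raises IndexError, B raises KeyError
import Mathlib
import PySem

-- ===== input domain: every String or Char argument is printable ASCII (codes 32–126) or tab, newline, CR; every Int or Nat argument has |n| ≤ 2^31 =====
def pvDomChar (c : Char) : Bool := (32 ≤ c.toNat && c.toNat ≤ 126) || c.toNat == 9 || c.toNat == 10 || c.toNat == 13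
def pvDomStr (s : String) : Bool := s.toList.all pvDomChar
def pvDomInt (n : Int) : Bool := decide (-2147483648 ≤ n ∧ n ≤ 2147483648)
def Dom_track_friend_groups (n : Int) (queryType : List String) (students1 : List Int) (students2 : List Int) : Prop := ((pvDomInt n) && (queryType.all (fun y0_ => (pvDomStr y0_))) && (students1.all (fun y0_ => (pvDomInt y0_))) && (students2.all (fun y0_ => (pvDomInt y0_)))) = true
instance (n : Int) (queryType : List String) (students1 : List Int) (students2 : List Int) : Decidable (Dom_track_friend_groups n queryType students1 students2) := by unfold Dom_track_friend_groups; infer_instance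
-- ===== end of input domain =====

-- B replaces A's path-compressed union-by-size forest with a quick-find structure
-- (dict node -> group id + explicit member lists, relabeling the smaller group on union);
-- equal results are proved on Pre_ (ids of processed queries within 0..n).


-- ===== PORT A =====
-- UnionFind.find with path compression; the Nat fuel only makes the recursion
-- structural (inside Pre_ it is never exhausted: chains are shorter than the list).
def ufFind : Nat → List Int → Int → List Int × Int
  | 0, p, x => (p, x)
  | f+1, p, x =>
    let px := PySem.List.pyGetD p x 0
    if px ≠ x then
      let fr := ufFind f p px
      let p2 := PySem.List.pySetD fr.1 x fr.2
      (p2, PySem.List.pyGetD p2 x 0)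
    else (p, px)

-- UnionFind.union (state = (parent, size))
def ufUnion (ps : List Int × List Int) (a b : Int) : List Int × List Int :=
  let fa := ufFind ps.1.length ps.1 a
  let fb := ufFind fa.1.length fa.1 b
  if fa.2 = fb.2 then (fb.1, ps.2)
  else
    let rr := if PySem.List.pyGetD ps.2 fa.2 0 < PySem.List.pyGetD ps.2 fb.2 0 then (fb.2, fa.2) else (fa.2, fb.2)
    (PySem.List.pySetD fb.1 rr.2 rr.1,
     PySem.List.pySetD ps.2 rr.1 (PySem.List.pyGetD ps.2 rr.1 0 + PySem.List.pyGetD ps.2 rr.2 0))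

-- UnionFind.get_size (also returns the state: find mutates parent)
def ufGetSize (ps : List Int × List Int) (x : Int) : (List Int × List Int) × Int :=
  let f := ufFind ps.1.length ps.1 x
  ((f.1, ps.2), PySem.List.pyGetD ps.2 f.2 0)

def track_friend_groups (n : Int) (queryType : List String) (students1 : List Int) (students2 : List Int) : List Int :=
  (((queryType.zip students1).zip students2).foldl
    (fun st t =>
      if t.1.1 = "Friend" then (ufUnion st.1 t.1.2 t.2, st.2)
      else if t.1.1 = "Total" then
        let g1 := ufGetSize st.1 t.1.2
        let g2 := ufGetSize g1.1 t.2
        (g2.1, st.2 ++ [g1.2 + g2.2])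
      else st)
    ((PySem.List.pyRange 0 (n+1) 1, List.replicate (n+1).toNat (1 : Int)), ([] : List Int))).2

-- ===== PORT B =====
def track_friend_groups_alt (n : Int) (queryType : List String) (students1 : List Int) (students2 : List Int) : List Int :=
  -- the two dict comprehensions: their keys range(n+1) are distinct, so the dicts
  -- are exactly the corresponding association lists in that order
  let r := PySem.List.pyRange 0 (n+1) 1
  let g0 : PySem.Dict Int Int := PySem.Dict.mk (r.map (fun x => (x, x)))
  let m0 : PySem.Dict Int (List Int) := PySem.Dict.mk (r.map (fun x => (x, [x])))
  (((queryType.zip students1).zip students2).foldl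
    (fun st t =>
      if t.1.1 = "Friend" then
        let ga := st.1.getD t.1.2 0
        let gb := st.1.getD t.2 0
        if ga ≠ gb then
          let la := st.2.1.getD ga []
          let lb := st.2.1.getD gb []
          let w := if la.length < lb.length then (gb, lb, ga, la) else (ga, la, gb, lb)
          (w.2.2.2.foldl (fun d x => d.insert x w.1) st.1,
           (st.2.1.insert w.1 (w.2.1 ++ w.2.2.2)).erase w.2.2.1,
           st.2.2)
        else st
      else if t.1.1 = "Total" then
        (st.1, st.2.1,
         st.2.2 ++ [((st.2.1.getD (st.1.getD t.1.2 0) []).length : Int) + ((st.2.1.getD (st.1.getD t.2 0) []).length : Int)])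
      else st)
    (g0, m0, ([] : List Int))).2.2

-- ===== PRECONDITION & SPEC =====
-- Pre_ excludes processed ('Friend'/'Total') queries whose student ids lie outside 0..n:
-- there A either raises IndexError or, for ids in [-(n+1),-1], returns a value only via
-- Python's negative-index wraparound, while B's dict lookup raises KeyError.
def Pre_track_friend_groups (n : Int) (queryType : List String) (students1 : List Int) (students2 : List Int) : Prop :=
  ∀ t ∈ (queryType.zip students1).zip students2,
    (t.1.1 = "Friend" ∨ t.1.1 = "Total") → 0 ≤ t.1.2 ∧ t.1.2 ≤ n ∧ 0 ≤ t.2 ∧ t.2 ≤ n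
instance (n : Int) (queryType : List String) (students1 : List Int) (students2 : List Int) : Decidable (Pre_track_friend_groups n queryType students1 students2) := by unfold Pre_track_friend_groups; infer_instance

def pvWitness_track_friend_groups : Int × List String × List Int × List Int :=
  (2, ["Friend", "Total"], [1, 1], [2, 2])

def Spec_track_friend_groups (n : Int) (queryType : List String) (students1 : List Int) (students2 : List Int) (out : List Int) : Prop := out = track_friend_groups_alt n queryType students1 students2
instance (n : Int) (queryType : List String) (students1 : List Int) (students2 : List Int) (out : List Int) : Decidable (Spec_track_friend_groups n queryType students1 students2 out) := by unfold Spec_track_friend_groups; infer_instance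

-- ===== CLAIM (what is proved, stated in full; the proofs are below) =====
def Claim_equal_track_friend_groups : Prop := ∀ (n : Int) (queryType : List String) (students1 : List Int) (students2 : List Int), Dom_track_friend_groups n queryType students1 students2 → Pre_track_friend_groups n queryType students1 students2 → Spec_track_friend_groups n queryType students1 students2 (track_friend_groups n queryType students1 students2)

-- ===== LEMMAS AND PROOFS =====


-- shorthand for Python list indexing with default 0 (indices in the proofs are nonnegative)
def Pg (p : List Int) (x : Int) : Int := PySem.List.pyGetD p x 0

def rngN (N : Nat) (x : Int) : Prop := 0 ≤ x ∧ x < (N : Int)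

-- the parent-forest invariant of A's state: c is the canonical-root map, d a depth measure
def InvP (N : Nat) (p : List Int) (c : Int → Int) (d : Int → Nat) : Prop :=
  p.length = N ∧
  (∀ x, rngN N x → rngN N (Pg p x)) ∧
  (∀ x, rngN N x → rngN N (c x) ∧ Pg p (c x) = c x ∧ c (Pg p x) = c x) ∧
  (∀ x, rngN N x → Pg p x = x → c x = x) ∧
  (∀ x, rngN N x → Pg p x ≠ x → d (Pg p x) < d x) ∧
  (∀ x, rngN N x → Pg p x = x → d x = 0)

-- the coupling invariant between A's state (p, s) and B's state (g, m)
def InvC (N : Nat) (p s : List Int) (g : PySem.Dict Int Int) (m : PySem.Dict Int (List Int)) (c : Int → Int) (d : Int → Nat) : Prop :=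
  InvP N p c d ∧
  s.length = N ∧
  (∀ x, rngN N x → d x < (m.getD (c x) []).length) ∧
  (∀ x, rngN N x → g.getD x 0 = c x) ∧
  (∀ x, rngN N x → x ∈ m.getD (c x) []) ∧
  (∀ k l, m.get? k = some l → (∀ y ∈ l, rngN N y ∧ c y = k) ∧ l.Nodup) ∧
  (∀ x, rngN N x → Pg s (c x) = ((m.getD (c x) []).length : Int))

-- A's and B's loop bodies, named for the proofs (definitionally the ports' lambdas)
def stepA (st : (List Int × List Int) × List Int) (t : (String × Int) × Int) : (List Int × List Int) × List Int :=
  if t.1.1 = "Friend" then (ufUnion st.1 t.1.2 t.2, st.2)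
  else if t.1.1 = "Total" then
    let g1 := ufGetSize st.1 t.1.2
    let g2 := ufGetSize g1.1 t.2
    (g2.1, st.2 ++ [g1.2 + g2.2])
  else st

def stepB (st : PySem.Dict Int Int × PySem.Dict Int (List Int) × List Int) (t : (String × Int) × Int) : PySem.Dict Int Int × PySem.Dict Int (List Int) × List Int :=
  if t.1.1 = "Friend" then
    let ga := st.1.getD t.1.2 0
    let gb := st.1.getD t.2 0
    if ga ≠ gb then
      let la := st.2.1.getD ga []
      let lb := st.2.1.getD gb []
      let w := if la.length < lb.length then (gb, lb, ga, la) else (ga, la, gb, lb)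
      (w.2.2.2.foldl (fun d x => d.insert x w.1) st.1,
       (st.2.1.insert w.1 (w.2.1 ++ w.2.2.2)).erase w.2.2.1,
       st.2.2)
    else st
  else if t.1.1 = "Total" then
    (st.1, st.2.1,
     st.2.2 ++ [((st.2.1.getD (st.1.getD t.1.2 0) []).length : Int) + ((st.2.1.getD (st.1.getD t.2 0) []).length : Int)])
  else st

lemma trackA_eq (n : Int) (qt : List String) (s1 s2 : List Int) :
    track_friend_groups n qt s1 s2 =
      (((qt.zip s1).zip s2).foldl stepA
        ((PySem.List.pyRange 0 (n+1) 1, List.replicate (n+1).toNat (1 : Int)), ([] : List Int))).2 := rfl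

lemma trackB_eq (n : Int) (qt : List String) (s1 s2 : List Int) :
    track_friend_groups_alt n qt s1 s2 =
      (((qt.zip s1).zip s2).foldl stepB
        (PySem.Dict.mk ((PySem.List.pyRange 0 (n+1) 1).map (fun x => (x, x))),
         PySem.Dict.mk ((PySem.List.pyRange 0 (n+1) 1).map (fun x => (x, [x]))),
         ([] : List Int))).2.2 := rfl

-- list indexing after an in-range write
lemma Pg_set (p : List Int) (i v j : Int) (hi0 : 0 ≤ i) (hi : i < (p.length : Int)) (hj0 : 0 ≤ j) :
    Pg (PySem.List.pySetD p i v) j = if j = i then v else Pg p j := by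
  obtain ⟨ni, rfl⟩ : ∃ ni : Nat, i = (ni : Int) := ⟨i.toNat, (Int.toNat_of_nonneg hi0).symm⟩
  obtain ⟨nj, rfl⟩ : ∃ nj : Nat, j = (nj : Int) := ⟨j.toNat, (Int.toNat_of_nonneg hj0).symm⟩
  have hni : ni < p.length := by exact_mod_cast hi
  unfold Pg
  rw [PySem.List.pyGetD_pySetD_natCast p ni nj v 0 hni]
  simp

lemma dict_get?_erase {v : Type} (d : PySem.Dict Int v) (k k' : Int) :
    (d.erase k).get? k' = if k' = k then none else d.get? k' := by
  obtain ⟨items⟩ := d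
  simp only [PySem.Dict.erase, PySem.Dict.get?]
  induction items with
  | nil => simp
  | cons q rest ih =>
    rw [List.filter_cons]
    by_cases h1 : q.1 = k
    · rw [if_neg (by simp [h1]), ih]
      by_cases h3 : k' = k
      · simp [h3]
      · rw [if_neg h3, List.find?_cons_of_neg (by simp [h1, Ne.symm h3]), if_neg h3]
    · rw [if_pos (by simp [h1])]
      by_cases h2 : q.1 = k'
      · rw [List.find?_cons_of_pos (by simp [h2]), List.find?_cons_of_pos (by simp [h2]),
          if_neg (by rintro rfl; exact h1 h2)]
      · rw [List.find?_cons_of_neg (by simp [h2]), List.find?_cons_of_neg (by simp [h2]), ih]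

lemma getD_foldl_insert_fn {v : Type} (l : List Int) (f : Int → v) (g0 : PySem.Dict Int v) (dflt : v) (y : Int) :
    (l.foldl (fun d x => d.insert x (f x)) g0).getD y dflt = if y ∈ l then f y else g0.getD y dflt := by
  induction l generalizing g0 with
  | nil => simp
  | cons a l ih =>
    simp only [List.foldl_cons, ih, PySem.Dict.getD_insert, List.mem_cons]
    by_cases h : y ∈ l <;> by_cases h2 : y = a <;> simp [h, h2]

lemma get?_mk_map {v : Type} (l : List Int) (f : Int → v) (k : Int) :
    (PySem.Dict.mk (l.map (fun x => (x, f x)))).get? k = if k ∈ l then some (f k) else none := by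
  induction l with
  | nil => simp [PySem.Dict.get?]
  | cons a l ih =>
    rw [List.map_cons, PySem.Dict.get?_mk_cons]
    by_cases h : a = k
    · simp [h]
    · simp only [beq_iff_eq, h, if_false, ih, List.mem_cons]
      by_cases h2 : k ∈ l <;> simp [h2]
      exact fun hh => h hh.symm

-- a nodup list of ints inside [0, N) has at most N elements
lemma length_le_of_nodup_rng (N : Nat) (l : List Int) (h1 : l.Nodup)
    (h2 : ∀ y ∈ l, rngN N y) : l.length ≤ N := by
  have hm : (l.map Int.toNat).Nodup := by
    refine h1.map_on ?_
    intro x hx y hy hxy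
    have hx' := (h2 x hx).1; have hy' := (h2 y hy).1
    omega
  have hsub : (l.map Int.toNat) ⊆ List.range N := by
    intro z hz
    obtain ⟨y, hy, rfl⟩ := List.mem_map.mp hz
    obtain ⟨h0, hN⟩ := h2 y hy
    simp only [List.mem_range]
    omega
  have := (List.subperm_of_subset hm hsub).length_le
  simpa using this

-- the members list at a live root is present in m
lemma members_get?_some (N : Nat) (p s : List Int) (g : PySem.Dict Int Int)
    (m : PySem.Dict Int (List Int)) (c : Int → Int) (d : Int → Nat)
    (hI : InvC N p s g m c d) (x : Int) (hx : rngN N x) :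
    m.get? (c x) = some (m.getD (c x) []) := by
  have hmem := hI.2.2.2.2.1 x hx
  cases h : m.get? (c x) with
  | none => rw [PySem.Dict.getD_of_get?_eq_none _ _ h] at hmem; simp at hmem
  | some l => rw [PySem.Dict.getD_eq_get?_getD, h]; rfl

lemma mem_members_iff (N : Nat) (p s : List Int) (g : PySem.Dict Int Int)
    (m : PySem.Dict Int (List Int)) (c : Int → Int) (d : Int → Nat)
    (hI : InvC N p s g m c d) (x : Int) (hx : rngN N x) (y : Int) :
    y ∈ m.getD (c x) [] ↔ rngN N y ∧ c y = c x := by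
  constructor
  · intro hy
    exact (hI.2.2.2.2.2.1 _ _ (members_get?_some N p s g m c d hI x hx)).1 y hy
  · rintro ⟨hyr, hcy⟩
    have := hI.2.2.2.2.1 y hyr
    rwa [hcy] at this

lemma members_nodup (N : Nat) (p s : List Int) (g : PySem.Dict Int Int)
    (m : PySem.Dict Int (List Int)) (c : Int → Int) (d : Int → Nat)
    (hI : InvC N p s g m c d) (x : Int) (hx : rngN N x) :
    (m.getD (c x) []).Nodup :=
  (hI.2.2.2.2.2.1 _ _ (members_get?_some N p s g m c d hI x hx)).2

lemma members_length_le (N : Nat) (p s : List Int) (g : PySem.Dict Int Int)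
    (m : PySem.Dict Int (List Int)) (c : Int → Int) (d : Int → Nat)
    (hI : InvC N p s g m c d) (x : Int) (hx : rngN N x) :
    (m.getD (c x) []).length ≤ N := by
  refine length_le_of_nodup_rng N _ (members_nodup N p s g m c d hI x hx) ?_
  intro y hy
  exact ((mem_members_iff N p s g m c d hI x hx y).mp hy).1

lemma d_lt_N (N : Nat) (p s : List Int) (g : PySem.Dict Int Int)
    (m : PySem.Dict Int (List Int)) (c : Int → Int) (d : Int → Nat)
    (hI : InvC N p s g m c d) (x : Int) (hx : rngN N x) : d x < N :=
  lt_of_lt_of_le (hI.2.2.1 x hx) (members_length_le N p s g m c d hI x hx)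

-- c is idempotent
lemma c_idem (N : Nat) (p : List Int) (c : Int → Int) (d : Int → Nat)
    (hP : InvP N p c d) (x : Int) (hx : rngN N x) : c (c x) = c x := by
  obtain ⟨hcx, hroot, -⟩ := hP.2.2.1 x hx
  exact hP.2.2.2.1 (c x) hcx hroot

-- ===== find: returns the canonical root, preserves the forest invariant =====
lemma ufFind_spec (N : Nat) (c : Int → Int) (d : Int → Nat) :
    ∀ (fuel : Nat) (p : List Int) (x : Int), InvP N p c d → rngN N x → d x < fuel →
      (ufFind fuel p x).2 = c x ∧ InvP N (ufFind fuel p x).1 c d := by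
  intro fuel
  induction fuel with
  | zero => intro p x _ _ h; omega
  | succ f ih =>
    intro p x hP hx hdx
    obtain ⟨hlen, hrng, hc, hfix, hdec, hd0⟩ := hP
    by_cases hpx : Pg p x = x
    · -- parent[x] == x: x is a root, returned unchanged
      have hpx' : PySem.List.pyGetD p x 0 = x := hpx
      have : ufFind (f+1) p x = (p, Pg p x) := by
        simp [ufFind, hpx', Pg]
      rw [this, hpx]
      exact ⟨(hfix x hx hpx).symm, hlen, hrng, hc, hfix, hdec, hd0⟩
    · -- recurse on the parent, then compress
      have hxr := hrng x hx
      have hdlt : d (Pg p x) < f := by have := hdec x hx hpx; omega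
      obtain ⟨ih2, ihP⟩ := ih p (Pg p x) ⟨hlen, hrng, hc, hfix, hdec, hd0⟩ hxr hdlt
      obtain ⟨hlen', hrng', hc', hfix', hdec', hd0'⟩ := ihP
      have hcc : c (Pg p x) = c x := (hc x hx).2.2
      have hr2 : (ufFind f p (Pg p x)).2 = c x := by rw [ih2, hcc]
      -- facts about the canonical root of x
      have hcxr : rngN N (c x) := (hc x hx).1
      have hcx_ne : c x ≠ x := fun h => hpx (by have := (hc x hx).2.1; rwa [h] at this)
      have hcx_root : Pg p (c x) = c x := (hc x hx).2.1
      have hcx_d0 : d (c x) = 0 := hd0 (c x) hcxr hcx_root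
      have hdx_pos : 0 < d x := by have := hdec x hx hpx; omega
      set p1 := (ufFind f p (Pg p x)).1 with hp1
      have hx0 : (0:Int) ≤ x := hx.1
      have hxlen : x < (p1.length : Int) := by rw [hlen']; exact hx.2
      have hset : ∀ j : Int, 0 ≤ j →
          Pg (PySem.List.pySetD p1 x (c x)) j = if j = x then c x else Pg p1 j := by
        intro j hj; exact Pg_set p1 x (c x) j hx0 hxlen hj
      have hres : ufFind (f+1) p x =
          (PySem.List.pySetD p1 x (c x), Pg (PySem.List.pySetD p1 x (c x)) x) := by
        simp only [ufFind, Pg] at *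
        rw [if_pos hpx]
        simp only [← hp1, ih2, hcc]
      have hgetx : Pg (PySem.List.pySetD p1 x (c x)) x = c x := by
        rw [hset x hx0, if_pos rfl]
      rw [hres]
      refine ⟨hgetx, ?_, ?_, ?_, ?_, ?_, ?_⟩
      · rw [PySem.List.length_pySetD]; exact hlen'
      · intro y hy
        rw [hset y hy.1]
        by_cases h : y = x
        · simpa [h] using hcxr
        · simpa [h] using hrng' y hy
      · intro y hy
        have hcyr := (hc' y hy).1
        refine ⟨hcyr, ?_, ?_⟩
        · -- parent of the root c y is unchanged (c y is never a compressed node ≠ root)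
          rw [hset (c y) hcyr.1]
          by_cases h : c y = x
          · -- then x would already be a root of p: contradiction with hpx
            exfalso
            have hroot : Pg p (c y) = c y := (hc y hy).2.1
            rw [h] at hroot
            exact hpx hroot
          · simpa [h] using (hc' y hy).2.1
        · rw [hset y hy.1]
          by_cases h : y = x
          · rw [if_pos h, h]
            exact c_idem N p c d ⟨hlen, hrng, hc, hfix, hdec, hd0⟩ x hx
          · simpa [h] using (hc' y hy).2.2
      · intro y hy hpy
        rw [hset y hy.1] at hpy
        by_cases h : y = x
        · exfalso; subst h; rw [if_pos rfl] at hpy; exact hcx_ne hpy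
        · rw [if_neg h] at hpy; exact hfix' y hy hpy
      · intro y hy hpy
        rw [hset y hy.1] at hpy ⊢
        by_cases h : y = x
        · subst h; rw [if_pos rfl] at hpy ⊢; rw [hcx_d0]; exact hdx_pos
        · rw [if_neg h] at hpy ⊢; exact hdec' y hy hpy
      · intro y hy hpy
        rw [hset y hy.1] at hpy
        by_cases h : y = x
        · exfalso; subst h; rw [if_pos rfl] at hpy; exact hcx_ne hpy
        · rw [if_neg h] at hpy; exact hd0' y hy hpy

-- ===== merge: A's link + size update matches B's relabel (w = kept root, l = absorbed root) =====
lemma merge_inv (N : Nat) (p s : List Int) (g : PySem.Dict Int Int)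
    (m : PySem.Dict Int (List Int)) (c : Int → Int) (d : Int → Nat)
    (hI : InvC N p s g m c d) (w l : Int) (hw : rngN N w) (hl : rngN N l)
    (hcw : c w = w) (hcl : c l = l) (hwl : w ≠ l) :
    InvC N (PySem.List.pySetD p l w)
      (PySem.List.pySetD s w (Pg s w + Pg s l))
      ((m.getD l []).foldl (fun d x => d.insert x w) g)
      ((m.insert w (m.getD w [] ++ m.getD l [])).erase l)
      (fun y => if c y = l then w else c y)
      (fun y => if c y = l then d y + 1 else d y) := by
  obtain ⟨⟨hlen, hrng, hc, hfix, hdec, hd0⟩, hslen, hdlt, hg, hmem, hm?, hsz⟩ := hI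
  set lw := m.getD w [] with hlwdef
  set ll := m.getD l [] with hlldef
  have hIfull : InvC N p s g m c d := ⟨⟨hlen, hrng, hc, hfix, hdec, hd0⟩, hslen, hdlt, hg, hmem, hm?, hsz⟩
  have hget?w : m.get? w = some lw := by
    have := members_get?_some N p s g m c d hIfull w hw; rwa [hcw] at this
  have hget?l : m.get? l = some ll := by
    have := members_get?_some N p s g m c d hIfull l hl; rwa [hcl] at this
  have hmw : ∀ y, y ∈ lw ↔ rngN N y ∧ c y = w := by
    intro y; have := mem_members_iff N p s g m c d hIfull w hw y; rwa [hcw] at this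
  have hml : ∀ y, y ∈ ll ↔ rngN N y ∧ c y = l := by
    intro y; have := mem_members_iff N p s g m c d hIfull l hl y; rwa [hcl] at this
  have hwin : w ∈ lw := (hmw w).mpr ⟨hw, hcw⟩
  have hlin : l ∈ ll := (hml l).mpr ⟨hl, hcl⟩
  have hndw : lw.Nodup := (hm? _ _ hget?w).2
  have hndl : ll.Nodup := (hm? _ _ hget?l).2
  have hdisj : ∀ y, y ∈ lw → y ∉ ll := by
    intro y hy hy'
    have h1 := ((hmw y).mp hy).2
    have h2 := ((hml y).mp hy').2
    exact hwl (h1 ▸ h2 ▸ rfl)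
  have hpw : Pg p w = w := by have := (hc w hw).2.1; rwa [hcw] at this
  have hdw0 : d w = 0 := hd0 w hw hpw
  have hcwl : c w ≠ l := by rw [hcw]; exact hwl
  have hm'get? : ∀ k, ((m.insert w (lw ++ ll)).erase l).get? k =
      if k = l then none else if k = w then some (lw ++ ll) else m.get? k := by
    intro k
    rw [dict_get?_erase, PySem.Dict.get?_insert]
  have hm'getD : ∀ k, ((m.insert w (lw ++ ll)).erase l).getD k [] =
      if k = l then [] else if k = w then lw ++ ll else m.getD k [] := by
    intro k
    rw [PySem.Dict.getD_eq_get?_getD, hm'get?]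
    split
    · rfl
    · split
      · rfl
      · rw [PySem.Dict.getD_eq_get?_getD]
  have hPg' : ∀ j : Int, 0 ≤ j → Pg (PySem.List.pySetD p l w) j = if j = l then w else Pg p j := by
    intro j hj; exact Pg_set p l w j hl.1 (by rw [hlen]; exact hl.2) hj
  have hSg' : ∀ j : Int, 0 ≤ j →
      Pg (PySem.List.pySetD s w (Pg s w + Pg s l)) j = if j = w then Pg s w + Pg s l else Pg s j := by
    intro j hj; exact Pg_set s w _ j hw.1 (by rw [hslen]; exact hw.2) hj
  have hg' : ∀ y, rngN N y → (ll.foldl (fun d x => d.insert x w) g).getD y 0 = if c y = l then w else c y := by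
    intro y hy
    rw [show (fun (d : PySem.Dict Int Int) (x : Int) => d.insert x w) = (fun d x => d.insert x ((fun _ => w) x)) from rfl,
      getD_foldl_insert_fn]
    by_cases hyl : y ∈ ll
    · rw [if_pos hyl, if_pos ((hml y).mp hyl).2]
    · rw [if_neg hyl, hg y hy, if_neg (fun hcyl => hyl ((hml y).mpr ⟨hy, hcyl⟩))]
  have hlw1 : 0 < lw.length := List.length_pos_of_mem hwin
  have hll1 : 0 < ll.length := List.length_pos_of_mem hlin
  refine ⟨⟨?_, ?_, ?_, ?_, ?_, ?_⟩, ?_, ?_, ?_, ?_, ?_, ?_⟩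
  · rw [PySem.List.length_pySetD]; exact hlen
  · intro y hy
    rw [hPg' y hy.1]
    split
    · exact hw
    · exact hrng y hy
  · intro y hy
    refine ⟨?_, ?_, ?_⟩
    · dsimp only; split
      · exact hw
      · exact (hc y hy).1
    · dsimp only
      by_cases hcy : c y = l
      · rw [if_pos hcy, hPg' w hw.1, if_neg hwl, hpw]
      · rw [if_neg hcy, hPg' (c y) (hc y hy).1.1, if_neg hcy, (hc y hy).2.1]
    · dsimp only
      by_cases hyl : y = l
      · rw [hPg' y hy.1, if_pos hyl, hyl]
        rw [if_neg hcwl, hcw, if_pos hcl]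
      · rw [hPg' y hy.1, if_neg hyl, (hc y hy).2.2]
  · intro y hy hpy
    rw [hPg' y hy.1] at hpy
    by_cases hyl : y = l
    · rw [if_pos hyl] at hpy; exact absurd (hpy ▸ hyl) hwl
    · rw [if_neg hyl] at hpy
      have hcy := hfix y hy hpy
      dsimp only
      rw [if_neg (fun h => hyl (hcy ▸ h)), hcy]
  · intro y hy hpy
    rw [hPg' y hy.1] at hpy ⊢
    by_cases hyl : y = l
    · rw [if_pos hyl] at hpy ⊢
      dsimp only
      rw [if_neg hcwl, hdw0, hyl, if_pos hcl]
      omega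
    · rw [if_neg hyl] at hpy ⊢
      have hlt := hdec y hy hpy
      have hceq : c (Pg p y) = c y := (hc y hy).2.2
      dsimp only
      rw [hceq]
      split <;> omega
  · intro y hy hpy
    rw [hPg' y hy.1] at hpy
    by_cases hyl : y = l
    · rw [if_pos hyl] at hpy; exact absurd (hpy ▸ hyl) hwl
    · rw [if_neg hyl] at hpy
      have hcy := hfix y hy hpy
      have hdy := hd0 y hy hpy
      dsimp only
      rw [if_neg (fun h => hyl (hcy ▸ h))]
      exact hdy
  · rw [PySem.List.length_pySetD]; exact hslen
  · intro y hy
    dsimp only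
    rw [hm'getD]
    by_cases hcy : c y = l
    · have hdy := hdlt y hy
      rw [hcy, ← hlldef] at hdy
      rw [if_pos hcy, if_pos hcy, if_neg hwl, if_pos rfl, List.length_append]
      omega
    · rw [if_neg hcy, if_neg hcy]
      by_cases hcyw : c y = w
      · have hdy := hdlt y hy
        rw [hcyw, ← hlwdef] at hdy
        rw [hcyw, if_neg hwl, if_pos rfl, List.length_append]
        omega
      · rw [if_neg hcy, if_neg hcyw]
        exact hdlt y hy
  · intro y hy
    exact hg' y hy
  · intro x hx
    dsimp only
    rw [hm'getD]
    by_cases hcy : c x = l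
    · rw [if_pos hcy, if_neg hwl, if_pos rfl]
      exact List.mem_append_right _ (by rw [hlldef, ← hcy]; exact hmem x hx)
    · rw [if_neg hcy]
      by_cases hcyw : c x = w
      · rw [hcyw, if_neg hwl, if_pos rfl]
        exact List.mem_append_left _ (by rw [hlwdef, ← hcyw]; exact hmem x hx)
      · rw [if_neg hcy, if_neg hcyw]
        exact hmem x hx
  · intro k l' hkl
    rw [hm'get? k] at hkl
    by_cases hkl' : k = l
    · rw [if_pos hkl'] at hkl; cases hkl
    · rw [if_neg hkl'] at hkl
      by_cases hkw : k = w
      · rw [if_pos hkw] at hkl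
        cases hkl
        constructor
        · intro y hy
          dsimp only
          rcases List.mem_append.mp hy with hy' | hy'
          · obtain ⟨hyr, hcy⟩ := (hmw y).mp hy'
            refine ⟨hyr, ?_⟩
            rw [if_neg (fun h => hwl (hcy ▸ h)), hcy, hkw]
          · obtain ⟨hyr, hcy⟩ := (hml y).mp hy'
            exact ⟨hyr, by rw [if_pos hcy, hkw]⟩
        · exact hndw.append hndl (List.disjoint_left.mpr hdisj)
      · rw [if_neg hkw] at hkl
        obtain ⟨helts, hnd⟩ := hm? k l' hkl
        refine ⟨?_, hnd⟩
        intro y hy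
        obtain ⟨hyr, hcy⟩ := helts y hy
        refine ⟨hyr, ?_⟩
        dsimp only
        rw [if_neg (fun h => hkl' (hcy ▸ h))]
        exact hcy
  · intro x hx
    dsimp only
    rw [hm'getD]
    by_cases hcy : c x = l
    · rw [if_pos hcy, if_neg hwl, if_pos rfl, hSg' w hw.1, if_pos rfl, List.length_append]
      have h1 := hsz w hw
      have h2 := hsz l hl
      rw [hcw, ← hlwdef] at h1
      rw [hcl, ← hlldef] at h2
      rw [h1, h2]
      push_cast
      ring
    · rw [if_neg hcy, if_neg hcy]
      by_cases hcyw : c x = w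
      · rw [hcyw, if_pos rfl, hSg' w hw.1, if_pos rfl, List.length_append]
        have h1 := hsz w hw
        have h2 := hsz l hl
        rw [hcw, ← hlwdef] at h1
        rw [hcl, ← hlldef] at h2
        rw [h1, h2]
        push_cast
        ring
      · rw [if_neg hcyw, hSg' (c x) (hc x hx).1.1, if_neg hcyw]
        exact hsz x hx

-- ===== the initial states satisfy the invariant =====
lemma InvC_init (n : Int) (hn : 0 ≤ n) :
    InvC (n+1).toNat (PySem.List.pyRange 0 (n+1) 1) (List.replicate (n+1).toNat (1 : Int))
      (PySem.Dict.mk ((PySem.List.pyRange 0 (n+1) 1).map (fun x => (x, x))))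
      (PySem.Dict.mk ((PySem.List.pyRange 0 (n+1) 1).map (fun x => (x, [x]))))
      (fun y => y) (fun _ => 0) := by
  set N := (n+1).toNat with hNdef
  have hNi : ((N : Nat) : Int) = n + 1 := by omega
  have hr : PySem.List.pyRange 0 (n+1) 1 = (List.range N).map Int.ofNat := by
    rw [← hNi, PySem.List.pyRange_zero_natCast]
    rfl
  have hmem : ∀ y : Int, y ∈ PySem.List.pyRange 0 (n+1) 1 ↔ rngN N y := by
    intro y
    rw [PySem.List.mem_pyRange_one, rngN, hNi]
  have hPg : ∀ x : Int, rngN N x → Pg (PySem.List.pyRange 0 (n+1) 1) x = x := by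
    intro x hx
    obtain ⟨nx, rfl⟩ : ∃ nx : Nat, x = (nx : Int) := ⟨x.toNat, (Int.toNat_of_nonneg hx.1).symm⟩
    have hnx : nx < N := by exact_mod_cast hx.2
    rw [hr]
    unfold Pg
    rw [PySem.List.pyGetD_natCast, List.getD_eq_getElem?_getD, List.getElem?_map]
    simp [hnx]
  have hlen : (PySem.List.pyRange 0 (n+1) 1).length = N := by simp [hr]
  have hg : ∀ y : Int, rngN N y →
      (PySem.Dict.mk ((PySem.List.pyRange 0 (n+1) 1).map (fun x => (x, x)))).getD y 0 = y := by
    intro y hy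
    rw [PySem.Dict.getD_eq_get?_getD, get?_mk_map, if_pos ((hmem y).mpr hy)]
    rfl
  have hm : ∀ y : Int, rngN N y →
      (PySem.Dict.mk ((PySem.List.pyRange 0 (n+1) 1).map (fun x => (x, [x])))).getD y [] = [y] := by
    intro y hy
    rw [PySem.Dict.getD_eq_get?_getD, get?_mk_map, if_pos ((hmem y).mpr hy)]
    rfl
  have hm? : ∀ k : Int,
      (PySem.Dict.mk ((PySem.List.pyRange 0 (n+1) 1).map (fun x => (x, [x])))).get? k =
        if k ∈ PySem.List.pyRange 0 (n+1) 1 then some [k] else none := by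
    intro k
    rw [get?_mk_map]
  have hs : ∀ x : Int, rngN N x → Pg (List.replicate N (1 : Int)) x = 1 := by
    intro x hx
    unfold Pg
    rw [PySem.List.pyGetD_eq_getElem _ _ hx.1 (by simpa using hx.2)]
    simp
  refine ⟨⟨hlen, ?_, ?_, ?_, ?_, ?_⟩, by simp, ?_, ?_, ?_, ?_, ?_⟩
  · intro x hx; rw [hPg x hx]; exact hx
  · intro x hx; exact ⟨hx, hPg x hx, by rw [hPg x hx]⟩
  · intro x hx _; rfl
  · intro x hx h; exact absurd (hPg x hx) h
  · intro x hx _; rfl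
  · intro x hx; rw [hm x hx]; simp
  · intro x hx; exact hg x hx
  · intro x hx; rw [hm x hx]; simp
  · intro k l hkl
    rw [hm? k] at hkl
    split at hkl
    · rename_i hk
      cases hkl
      refine ⟨?_, by simp⟩
      intro y hy
      simp only [List.mem_singleton] at hy
      subst hy
      exact ⟨(hmem y).mp hk, rfl⟩
    · cases hkl
  · intro x hx
    rw [hm x hx, hs x hx]
    simp

-- ===== the loop: equal outputs from coupled states =====
lemma loop_eq (N : Nat) :
    ∀ (ts : List ((String × Int) × Int)) (p s : List Int) (g : PySem.Dict Int Int)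
      (m : PySem.Dict Int (List Int)) (c : Int → Int) (d : Int → Nat) (res : List Int),
      InvC N p s g m c d →
      (∀ t ∈ ts, (t.1.1 = "Friend" ∨ t.1.1 = "Total") →
        (0 ≤ t.1.2 ∧ t.1.2 < (N : Int)) ∧ (0 ≤ t.2 ∧ t.2 < (N : Int))) →
      (ts.foldl stepA ((p, s), res)).2 = (ts.foldl stepB (g, m, res)).2.2 := by
  intro ts
  induction ts with
  | nil => intro p s g m c d res _ _; rfl
  | cons t ts ih =>
    intro p s g m c d res hI hbnd
    have hrest : ∀ t' ∈ ts, (t'.1.1 = "Friend" ∨ t'.1.1 = "Total") →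
        (0 ≤ t'.1.2 ∧ t'.1.2 < (N : Int)) ∧ (0 ≤ t'.2 ∧ t'.2 < (N : Int)) :=
      fun t' ht' => hbnd t' (List.mem_cons_of_mem _ ht')
    have hthis := hbnd t (List.mem_cons_self)
    simp only [List.foldl_cons]
    by_cases hq : t.1.1 = "Friend"
    · obtain ⟨ha, hb⟩ := hthis (Or.inl hq)
      have hlenp : p.length = N := hI.1.1
      have hda : d t.1.2 < p.length := by
        rw [hlenp]; exact d_lt_N N p s g m c d hI t.1.2 ha
      obtain ⟨hfa2, hfaP⟩ := ufFind_spec N c d p.length p t.1.2 hI.1 ha hda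
      have hlenfa : (ufFind p.length p t.1.2).1.length = N := hfaP.1
      have hdb : d t.2 < (ufFind p.length p t.1.2).1.length := by
        rw [hlenfa]; exact d_lt_N N p s g m c d hI t.2 hb
      obtain ⟨hfb2, hfbP⟩ := ufFind_spec N c d _ _ t.2 hfaP hb hdb
      have hI1 : InvC N (ufFind (ufFind p.length p t.1.2).1.length (ufFind p.length p t.1.2).1 t.2).1 s g m c d := ⟨hfbP, hI.2⟩
      have hga : g.getD t.1.2 0 = c t.1.2 := hI.2.2.2.1 t.1.2 ha
      have hgb : g.getD t.2 0 = c t.2 := hI.2.2.2.1 t.2 hb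
      have hstepA : stepA ((p, s), res) t = (ufUnion (p, s) t.1.2 t.2, res) := by
        simp [stepA, hq]
      by_cases hab : c t.1.2 = c t.2
      · have hunion : ufUnion (p, s) t.1.2 t.2 =
            ((ufFind (ufFind p.length p t.1.2).1.length (ufFind p.length p t.1.2).1 t.2).1, s) := by
          simp only [ufUnion]
          rw [if_pos (by rw [hfa2, hfb2]; exact hab)]
        have hstepB : stepB (g, m, res) t = (g, m, res) := by
          simp [stepB, hq, hga, hgb, hab]
        rw [hstepA, hunion, hstepB]
        exact ih _ s g m c d res hI1 hrest
      · have hsza : Pg s (c t.1.2) = ((m.getD (c t.1.2) []).length : Int) :=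
          hI.2.2.2.2.2.2 t.1.2 ha
        have hszb : Pg s (c t.2) = ((m.getD (c t.2) []).length : Int) :=
          hI.2.2.2.2.2.2 t.2 hb
        have hca : rngN N (c t.1.2) := (hI.1.2.2.1 t.1.2 ha).1
        have hcb : rngN N (c t.2) := (hI.1.2.2.1 t.2 hb).1
        have hra : c (c t.1.2) = c t.1.2 := c_idem N p c d hI.1 t.1.2 ha
        have hrb : c (c t.2) = c t.2 := c_idem N p c d hI.1 t.2 hb
        by_cases hlt : (m.getD (c t.1.2) []).length < (m.getD (c t.2) []).length
        · have hcmp : Pg s (c t.1.2) < Pg s (c t.2) := by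
            rw [hsza, hszb]; exact_mod_cast hlt
          have hunion : ufUnion (p, s) t.1.2 t.2 =
              (PySem.List.pySetD (ufFind (ufFind p.length p t.1.2).1.length (ufFind p.length p t.1.2).1 t.2).1 (c t.1.2) (c t.2),
               PySem.List.pySetD s (c t.2) (Pg s (c t.2) + Pg s (c t.1.2))) := by
            simp only [ufUnion]
            rw [if_neg (by rw [hfa2, hfb2]; exact hab), hfa2, hfb2,
              if_pos (by exact hcmp)]
            rfl
          have hstepB : stepB (g, m, res) t =
              ((m.getD (c t.1.2) []).foldl (fun d x => d.insert x (c t.2)) g,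
               (m.insert (c t.2) (m.getD (c t.2) [] ++ m.getD (c t.1.2) [])).erase (c t.1.2),
               res) := by
            simp [stepB, hq, hga, hgb, hab, hlt]
          rw [hstepA, hunion, hstepB]
          exact ih _ _ _ _ _ _ res
            (merge_inv N _ s g m c d hI1 (c t.2) (c t.1.2) hcb hca hrb hra (fun h => hab h.symm)) hrest
        · have hcmp : ¬ (Pg s (c t.1.2) < Pg s (c t.2)) := by
            rw [hsza, hszb]; intro h; exact hlt (by exact_mod_cast h)
          have hunion : ufUnion (p, s) t.1.2 t.2 =
              (PySem.List.pySetD (ufFind (ufFind p.length p t.1.2).1.length (ufFind p.length p t.1.2).1 t.2).1 (c t.2) (c t.1.2),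
               PySem.List.pySetD s (c t.1.2) (Pg s (c t.1.2) + Pg s (c t.2))) := by
            simp only [ufUnion]
            rw [if_neg (by rw [hfa2, hfb2]; exact hab), hfa2, hfb2,
              if_neg (by exact hcmp)]
            rfl
          have hstepB : stepB (g, m, res) t =
              ((m.getD (c t.2) []).foldl (fun d x => d.insert x (c t.1.2)) g,
               (m.insert (c t.1.2) (m.getD (c t.1.2) [] ++ m.getD (c t.2) [])).erase (c t.2),
               res) := by
            simp [stepB, hq, hga, hgb, hab, hlt]
          rw [hstepA, hunion, hstepB]
          exact ih _ _ _ _ _ _ res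
            (merge_inv N _ s g m c d hI1 (c t.1.2) (c t.2) hca hcb hra hrb hab) hrest
    · by_cases hq2 : t.1.1 = "Total"
      · obtain ⟨ha, hb⟩ := hthis (Or.inr hq2)
        have hlenp : p.length = N := hI.1.1
        have hda : d t.1.2 < p.length := by
          rw [hlenp]; exact d_lt_N N p s g m c d hI t.1.2 ha
        obtain ⟨hfa2, hfaP⟩ := ufFind_spec N c d p.length p t.1.2 hI.1 ha hda
        have hlenfa : (ufFind p.length p t.1.2).1.length = N := hfaP.1
        have hdb : d t.2 < (ufFind p.length p t.1.2).1.length := by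
          rw [hlenfa]; exact d_lt_N N p s g m c d hI t.2 hb
        obtain ⟨hfb2, hfbP⟩ := ufFind_spec N c d _ _ t.2 hfaP hb hdb
        have hI1 : InvC N (ufFind (ufFind p.length p t.1.2).1.length (ufFind p.length p t.1.2).1 t.2).1 s g m c d := ⟨hfbP, hI.2⟩
        have hga : g.getD t.1.2 0 = c t.1.2 := hI.2.2.2.1 t.1.2 ha
        have hgb : g.getD t.2 0 = c t.2 := hI.2.2.2.1 t.2 hb
        have hsza : Pg s (c t.1.2) = ((m.getD (c t.1.2) []).length : Int) :=
          hI.2.2.2.2.2.2 t.1.2 ha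
        have hszb : Pg s (c t.2) = ((m.getD (c t.2) []).length : Int) :=
          hI.2.2.2.2.2.2 t.2 hb
        have hstepA : stepA ((p, s), res) t =
            (((ufFind (ufFind p.length p t.1.2).1.length (ufFind p.length p t.1.2).1 t.2).1, s),
              res ++ [Pg s (c t.1.2) + Pg s (c t.2)]) := by
          simp only [stepA, ufGetSize]
          rw [if_neg hq, if_pos hq2, hfa2, hfb2]
          rfl
        have hstepB : stepB (g, m, res) t =
            (g, m, res ++ [((m.getD (c t.1.2) []).length : Int) + ((m.getD (c t.2) []).length : Int)]) := by
          simp [stepB, hq2, hga, hgb]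
        rw [hstepA, hstepB, hsza, hszb]
        exact ih _ s g m c d _ hI1 hrest
      · have hstepA : stepA ((p, s), res) t = ((p, s), res) := by
          simp [stepA, hq, hq2]
        have hstepB : stepB (g, m, res) t = (g, m, res) := by
          simp [stepB, hq, hq2]
        rw [hstepA, hstepB]
        exact ih p s g m c d res hI hrest

-- rows that are neither 'Friend' nor 'Total' leave both states untouched
lemma loop_skip :
    ∀ (ts : List ((String × Int) × Int)) (stA : (List Int × List Int) × List Int)
      (stB : PySem.Dict Int Int × PySem.Dict Int (List Int) × List Int),
      (∀ t ∈ ts, t.1.1 ≠ "Friend" ∧ t.1.1 ≠ "Total") →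
      ts.foldl stepA stA = stA ∧ ts.foldl stepB stB = stB := by
  intro ts
  induction ts with
  | nil => intro stA stB _; exact ⟨rfl, rfl⟩
  | cons t ts ih =>
    intro stA stB h
    obtain ⟨h1, h2⟩ := h t (List.mem_cons_self)
    have hrest := fun t' ht' => h t' (List.mem_cons_of_mem _ ht')
    simp only [List.foldl_cons]
    have hA : stepA stA t = stA := by simp [stepA, h1, h2]
    have hB : stepB stB t = stB := by simp [stepB, h1, h2]
    rw [hA, hB]
    exact ih stA stB hrest

-- ===== VERDICT (by name: the statement is the Claim_ definition above) =====
theorem track_friend_groups_spec : Claim_equal_track_friend_groups := by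
  intro n qt s1 s2 _hdom hpre
  unfold Spec_track_friend_groups
  rw [trackA_eq, trackB_eq]
  by_cases hn : 0 ≤ n
  · have hN : (((n+1).toNat : Nat) : Int) = n + 1 := by omega
    apply loop_eq (n+1).toNat _ _ _ _ _ (fun y => y) (fun _ => 0) _ (InvC_init n hn)
    intro t ht hq
    obtain ⟨h1, h2, h3, h4⟩ := hpre t ht hq
    rw [hN]
    exact ⟨⟨h1, by omega⟩, h3, by omega⟩
  · -- n < 0: Pre_ leaves no processable query, both loops skip every row
    have hskip := loop_skip ((qt.zip s1).zip s2)
      ((PySem.List.pyRange 0 (n+1) 1, List.replicate (n+1).toNat (1 : Int)), ([] : List Int))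
      (PySem.Dict.mk ((PySem.List.pyRange 0 (n+1) 1).map (fun x => (x, x))),
       PySem.Dict.mk ((PySem.List.pyRange 0 (n+1) 1).map (fun x => (x, [x]))),
       ([] : List Int))
      (fun t ht => by
      constructor <;> intro h
      · obtain ⟨h1, h2, -⟩ := hpre t ht (Or.inl h); omega
      · obtain ⟨h1, h2, -⟩ := hpre t ht (Or.inr h); omega)
    rw [hskip.1, hskip.2]
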